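-- pv_equiv track=rewrite | github.com/crzhacko/rove-esp32s3 | tools/redesign_pcb_rove_v.py | find_footprint
-- ===== SOURCE A (Python) =====
-- def block_end(lines, start):
--     """Return the line index of the closing paren of the S-expr block at 'start'."""
--     depth = 0
--     for i in range(start, len(lines)):
--         depth += lines[i].count('(') - lines[i].count(')')
--         if i > start and depth <= 0:
--             return i
--     return len(lines) - 1
--
-- def find_footprint(lines, ref):
--     """Return (block_start, block_end) for the footprint with given Reference."""
--     i = 0
--     while i < len(lines):
--         if lines[i].strip().startswith('(footprint '):
--             fp_start = i
--             fp_end   = block_end(lines, i)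
--             block    = ''.join(lines[fp_start:fp_end + 1])
--             if f'"Reference" "{ref}"' in block:
--                 return fp_start, fp_end
--             i = fp_end + 1
--         else:
--             i += 1
--     return None, None
-- ===== SOURCE B (Python) =====
-- def find_footprint(lines, ref):
--     """Return (block_start, block_end) for the footprint with given Reference."""
--     pat = f'"Reference" "{ref}"'
--     in_block = False
--     fp_start = 0
--     depth = 0
--     buf = []
--     for i, line in enumerate(lines):
--         if not in_block:
--             if line.strip().startswith('(footprint '):
--                 in_block = True
--                 fp_start = i
--                 depth = line.count('(') - line.count(')')
--                 buf = [line]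
--         else:
--             depth += line.count('(') - line.count(')')
--             buf.append(line)
--             if depth <= 0:
--                 if pat in ''.join(buf):
--                     return fp_start, i
--                 in_block = False
--     if in_block and pat in ''.join(buf):
--         return fp_start, len(lines) - 1
--     return None, None
-- ===== Notes on version B (the rewrite author's own statement) =====
-- stated objective: simpler
-- what changed: Replaces A's while-loop that calls a separate block_end rescanner and re-joins a list slice per candidate with one linear pass that keeps a running paren depth and an accumulating line buffer, deciding block ends inline.
import Mathlib
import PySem

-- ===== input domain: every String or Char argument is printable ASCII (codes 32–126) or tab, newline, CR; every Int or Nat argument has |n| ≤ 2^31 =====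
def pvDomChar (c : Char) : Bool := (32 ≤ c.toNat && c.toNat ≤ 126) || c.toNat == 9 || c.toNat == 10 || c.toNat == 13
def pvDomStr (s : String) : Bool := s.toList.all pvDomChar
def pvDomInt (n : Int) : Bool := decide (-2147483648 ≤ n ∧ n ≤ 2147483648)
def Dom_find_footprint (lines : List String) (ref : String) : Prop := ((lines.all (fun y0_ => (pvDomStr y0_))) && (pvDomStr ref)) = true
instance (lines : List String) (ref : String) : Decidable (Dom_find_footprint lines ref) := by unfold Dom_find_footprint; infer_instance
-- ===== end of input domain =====

-- B replaces A's restart-and-rescan via block_end with one linear pass keeping a running paren depth and buffer (objective: simpler single-pass decomposition).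

-- ===== PORT A =====
-- net '(' minus ')' of one line (used by both ports, as in both Pythons)
def pvBal (l : String) : Int := (PySem.Str.count l "(" : Int) - (PySem.Str.count l ")" : Int)

-- the for-loop of block_end, with early return
def blockEndLoop (lines : List String) (start i : Nat) (depth : Int) : Nat :=
  if h : i < lines.length then
    if start < i ∧ depth + pvBal lines[i] ≤ 0 then i
    else blockEndLoop lines start (i + 1) (depth + pvBal lines[i])
  else lines.length - 1
termination_by lines.length - i

def block_end (lines : List String) (start : Nat) : Nat :=
  blockEndLoop lines start start 0

-- cited by faLoop's decreasing_by
theorem blockEndLoop_ge (lines : List String) (start : Nat) :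
    ∀ k i d, lines.length - i ≤ k → start ≤ i → start < lines.length →
      start ≤ blockEndLoop lines start i d := by
  intro k
  induction k with
  | zero =>
    intro i d hk hsi hsl
    rw [blockEndLoop]
    split
    · omega
    · omega
  | succ k ih =>
    intro i d hk hsi hsl
    rw [blockEndLoop]
    split
    · split
      · omega
      · exact ih (i + 1) _ (by omega) (by omega) hsl
    · omega

-- the while-loop of find_footprint
def faLoop (lines : List String) (ref : String) (i : Nat) : Option Int × Option Int :=
  if h : i < lines.length then
    if PySem.Str.startswith (PySem.Str.strip lines[i]) "(footprint " then
      let e := block_end lines i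
      let block := PySem.Str.join "" (PySem.List.slice lines (some (i : Int)) (some ((e : Int) + 1)))
      if PySem.Str.isIn ("\"Reference\" \"" ++ ref ++ "\"") block then (some (i : Int), some (e : Int))
      else faLoop lines ref (e + 1)
    else faLoop lines ref (i + 1)
  else (none, none)
termination_by lines.length - i
decreasing_by
  · have := blockEndLoop_ge lines i (lines.length - i) i 0 (le_refl _) (le_refl i) h
    simp only [block_end] at *
    omega
  · omega

def find_footprint (lines : List String) (ref : String) : Option Int × Option Int :=
  faLoop lines ref 0

-- ===== PORT B =====
-- single pass; state = none (outside a block) or some (fp_start, depth, buffered lines)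
def fbLoop (lines : List String) (pat : String) (i : Nat)
    (st : Option (Nat × Int × List String)) : Option Int × Option Int :=
  if h : i < lines.length then
    match st with
    | none =>
      if PySem.Str.startswith (PySem.Str.strip lines[i]) "(footprint " then
        fbLoop lines pat (i + 1) (some (i, pvBal lines[i], [lines[i]]))
      else fbLoop lines pat (i + 1) none
    | some (s, d, buf) =>
      if d + pvBal lines[i] ≤ 0 then
        if PySem.Str.isIn pat (PySem.Str.join "" (buf ++ [lines[i]])) then (some (s : Int), some (i : Int))
        else fbLoop lines pat (i + 1) none
      else fbLoop lines pat (i + 1) (some (s, d + pvBal lines[i], buf ++ [lines[i]]))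
  else
    match st with
    | none => (none, none)
    | some (s, _, buf) =>
      if PySem.Str.isIn pat (PySem.Str.join "" buf) then
        (some (s : Int), some ((lines.length - 1 : Nat) : Int))
      else (none, none)
termination_by lines.length - i

def find_footprint_alt (lines : List String) (ref : String) : Option Int × Option Int :=
  fbLoop lines ("\"Reference\" \"" ++ ref ++ "\"") 0 none

-- ===== PRECONDITION & SPEC =====
def Spec_find_footprint (lines : List String) (ref : String) (out : Option Int × Option Int) : Prop := out = find_footprint_alt lines ref
instance (lines : List String) (ref : String) (out : Option Int × Option Int) : Decidable (Spec_find_footprint lines ref out) := by unfold Spec_find_footprint; infer_instance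

-- ===== CLAIM (what is proved, stated in full; the proofs are below) =====
def Claim_equal_find_footprint : Prop := ∀ (lines : List String) (ref : String), Dom_find_footprint lines ref → Spec_find_footprint lines ref (find_footprint lines ref)

-- ===== LEMMAS AND PROOFS =====

-- appending the current line extends the buffered slice by one
theorem take_snoc (lines : List String) (s i : Nat) (hi : i < lines.length) (hs : s ≤ i) :
    (lines.drop s).take (i - s) ++ [lines[i]] = (lines.drop s).take (i + 1 - s) := by
  have h1 : i + 1 - s = (i - s) + 1 := by omega
  rw [h1, List.take_add_one, List.getElem?_drop]
  have h2 : s + (i - s) = i := by omega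
  rw [h2, List.getElem?_eq_getElem hi]
  rfl

-- past the end of the list, both loops stop
theorem fbLoop_none_of_ge (lines : List String) (pat : String) (i : Nat)
    (h : lines.length ≤ i) : fbLoop lines pat i none = (none, none) := by
  rw [fbLoop]
  simp only [dif_neg (by omega : ¬ i < lines.length)]

-- while inside a block, B's running scan computes exactly block_end's answer and A's joined slice
theorem fbLoop_inBlock (lines : List String) (pat : String) :
    ∀ k i s d buf, lines.length - i ≤ k → s < i → s < lines.length →
      buf = (lines.drop s).take (i - s) →
      fbLoop lines pat i (some (s, d, buf)) =
        (if PySem.Str.isIn pat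
            (PySem.Str.join "" ((lines.drop s).take (blockEndLoop lines s i d + 1 - s))) then
           (some (s : Int), some ((blockEndLoop lines s i d : Nat) : Int))
         else fbLoop lines pat (blockEndLoop lines s i d + 1) none) := by
  intro k
  induction k with
  | zero =>
    intro i s d buf hk hsi hsl hbuf
    subst hbuf
    have hil : ¬ i < lines.length := by omega
    have hlen : (lines.drop s).length ≤ i - s := by
      simp [List.length_drop]; omega
    have hlen' : (lines.drop s).length ≤ lines.length - 1 + 1 - s := by
      simp [List.length_drop]; omega
    have e_eq : blockEndLoop lines s i d = lines.length - 1 := by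
      rw [blockEndLoop]; simp only [dif_neg hil]
    rw [e_eq, fbLoop_none_of_ge lines pat (lines.length - 1 + 1) (by omega)]
    conv_lhs => rw [fbLoop]
    simp only [dif_neg hil]
    rw [List.take_of_length_le hlen, List.take_of_length_le hlen']
  | succ k ih =>
    intro i s d buf hk hsi hsl hbuf
    subst hbuf
    by_cases hil : i < lines.length
    · by_cases hd : d + pvBal lines[i] ≤ 0
      · have e_eq : blockEndLoop lines s i d = i := by
          rw [blockEndLoop]; simp only [dif_pos hil, if_pos (And.intro hsi hd)]
        rw [e_eq]
        conv_lhs => rw [fbLoop]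
        simp only [dif_pos hil, if_pos hd]
        rw [take_snoc lines s i hil (by omega)]
      · have hneg : ¬ (s < i ∧ d + pvBal lines[i] ≤ 0) := fun hc => hd hc.2
        have e_eq : blockEndLoop lines s i d
            = blockEndLoop lines s (i + 1) (d + pvBal lines[i]) := by
          conv_lhs => rw [blockEndLoop]
          simp only [dif_pos hil, if_neg hneg]
        rw [e_eq]
        conv_lhs => rw [fbLoop]
        simp only [dif_pos hil, if_neg hd]
        exact ih (i + 1) s (d + pvBal lines[i]) _ (by omega) (by omega) hsl
          (by rw [take_snoc lines s i hil (by omega)])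
    · have hlen : (lines.drop s).length ≤ i - s := by
        simp [List.length_drop]; omega
      have hlen' : (lines.drop s).length ≤ lines.length - 1 + 1 - s := by
        simp [List.length_drop]; omega
      have e_eq : blockEndLoop lines s i d = lines.length - 1 := by
        rw [blockEndLoop]; simp only [dif_neg hil]
      rw [e_eq, fbLoop_none_of_ge lines pat (lines.length - 1 + 1) (by omega)]
      conv_lhs => rw [fbLoop]
      simp only [dif_neg hil]
      rw [List.take_of_length_le hlen, List.take_of_length_le hlen']

-- the two outer loops agree from any index onward
theorem loops_agree (lines : List String) (ref : String) :
    ∀ k i, lines.length - i ≤ k →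
      faLoop lines ref i = fbLoop lines ("\"Reference\" \"" ++ ref ++ "\"") i none := by
  intro k
  induction k with
  | zero =>
    intro i hk
    have hil : ¬ i < lines.length := by omega
    conv_lhs => rw [faLoop]
    rw [fbLoop_none_of_ge _ _ _ (by omega)]
    simp only [dif_neg hil]
  | succ k ih =>
    intro i hk
    by_cases hil : i < lines.length
    · conv_lhs => rw [faLoop]
      conv_rhs => rw [fbLoop]
      simp only [dif_pos hil]
      by_cases hfp : PySem.Str.startswith (PySem.Str.strip lines[i]) "(footprint " = true
      · simp only [if_pos hfp]
        rw [fbLoop_inBlock lines _ (lines.length - (i + 1)) (i + 1) i (pvBal lines[i])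
              [lines[i]] (le_refl _) (by omega) hil
              (by rw [← take_snoc lines i i hil (le_refl i)]; simp)]
        have hbe : blockEndLoop lines i (i + 1) (pvBal lines[i]) = block_end lines i := by
          rw [block_end]
          conv_rhs => rw [blockEndLoop]
          simp only [dif_pos hil, zero_add,
            if_neg (fun hc => absurd hc.1 (lt_irrefl i) : ¬ (i < i ∧ pvBal lines[i] ≤ 0))]
        have hge : i ≤ block_end lines i :=
          blockEndLoop_ge lines i (lines.length - i) i 0 (le_refl _) (le_refl i) hil
        have hslice : PySem.List.slice lines (some (i : Int)) (some ((block_end lines i : Int) + 1))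
            = (lines.drop i).take (block_end lines i + 1 - i) := by
          have hc : ((block_end lines i : Nat) : Int) + 1 = ((block_end lines i + 1 : Nat) : Int) := by
            push_cast; ring
          rw [hc, PySem.List.slice_natCast]
        rw [hbe, hslice]
        by_cases hin : PySem.Str.isIn ("\"Reference\" \"" ++ ref ++ "\"")
            (PySem.Str.join "" ((lines.drop i).take (block_end lines i + 1 - i))) = true
        · simp only [if_pos hin]
        · simp only [if_neg hin]
          exact ih (block_end lines i + 1) (by omega)
      · simp only [if_neg hfp]
        exact ih (i + 1) (by omega)
    · have hil' : ¬ i < lines.length := hil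
      conv_lhs => rw [faLoop]
      rw [fbLoop_none_of_ge _ _ _ (by omega)]
      simp only [dif_neg hil']

-- ===== VERDICT (by name: the statement is the Claim_ definition above) =====
theorem find_footprint_spec : Claim_equal_find_footprint := by
  intro lines ref _
  unfold Spec_find_footprint find_footprint find_footprint_alt
  exact loops_agree lines ref lines.length 0 (by omega)
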